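-- pv_equiv track=rewrite | github.com/stgary/cs-guided-project-problem-solving | src/csLongestPossible.py | csLongestPossible
-- ===== SOURCE A (Python) =====
-- def csLongestPossible(str_1: str, str_2: str) -> str:
--   # Given two strings that include only lower case alpha
--   # characters, str_1 and str_2, write a function that
--   # returns a new soreted string that contains any character (only once)
--   # that appeared in str_1 or str_2
--
--   # define an empty string to keep chars
--   output = ""
--
--   # iterate over the strings
--   for char in str_1:
--     # write an if statement that evaluates if the string is in the output string
--     if char in output:
--       continue
--     else:
--       output += char
--   # repeat because I cant figure out how to reduce it down to one for loop
--   for char in str_2: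
--
--     if char in output:
--       continue
--     else:
--       output += char
--
--
--
--   return ''.join(sorted(output))
-- ===== SOURCE B (Python) =====
-- def csLongestPossible(str_1: str, str_2: str) -> str:
--     # sort first, then drop adjacent duplicates in one pass
--     combined = sorted(str_1 + str_2)
--     res = []
--     prev = None
--     for ch in combined:
--         if ch != prev:
--             res.append(ch)
--             prev = ch
--     return ''.join(res)
-- ===== Notes on version B (the rewrite author's own statement) =====
-- stated objective: alternative
-- what changed: A dedups while scanning (membership test against the growing output) and sorts at the end; B sorts the concatenation first and then removes adjacent duplicates in a single pass with only a previous-character comparison, no membership test or set.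
import Mathlib
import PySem

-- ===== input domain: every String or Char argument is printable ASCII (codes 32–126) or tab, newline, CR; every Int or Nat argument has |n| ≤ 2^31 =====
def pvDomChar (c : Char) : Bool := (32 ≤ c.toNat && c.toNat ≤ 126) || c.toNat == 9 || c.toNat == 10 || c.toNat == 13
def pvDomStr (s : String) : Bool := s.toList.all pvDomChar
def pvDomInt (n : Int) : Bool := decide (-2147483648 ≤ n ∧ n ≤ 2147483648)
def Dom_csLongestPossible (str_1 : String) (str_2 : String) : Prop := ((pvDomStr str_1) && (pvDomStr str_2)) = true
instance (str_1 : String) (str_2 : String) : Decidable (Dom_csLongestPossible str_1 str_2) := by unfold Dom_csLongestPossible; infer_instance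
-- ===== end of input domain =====

-- B replaces A's dedup-while-scanning-then-sort by sort-then-drop-adjacent-duplicates (alternative decomposition, same cost class).

-- ===== PORT A =====
-- output is kept as a List Char ('char in output' / 'output += char' are exact over List Char)
def csLongestPossible (str_1 : String) (str_2 : String) : String :=
  let output1 := str_1.toList.foldl (fun out c => if out.contains c then out else out ++ [c]) []
  let output := str_2.toList.foldl (fun out c => if out.contains c then out else out ++ [c]) output1
  String.mk (PySem.List.sorted output (fun x => x) false)

-- ===== PORT B =====
def csLongestPossible_alt (str_1 : String) (str_2 : String) : String :=
  let combined := PySem.List.sorted (str_1.toList ++ str_2.toList) (fun x => x) false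
  let st := combined.foldl
    (fun (st : List Char × Option Char) ch =>
      if st.2 = some ch then st else (st.1 ++ [ch], some ch)) ([], none)
  String.mk st.1

-- ===== PRECONDITION & SPEC =====
def Spec_csLongestPossible (str_1 : String) (str_2 : String) (out : String) : Prop := out = csLongestPossible_alt str_1 str_2
instance (str_1 : String) (str_2 : String) (out : String) : Decidable (Spec_csLongestPossible str_1 str_2 out) := by unfold Spec_csLongestPossible; infer_instance

-- ===== CLAIM (what is proved, stated in full; the proofs are below) =====
def Claim_equal_csLongestPossible : Prop := ∀ (str_1 : String) (str_2 : String), Dom_csLongestPossible str_1 str_2 → Spec_csLongestPossible str_1 str_2 (csLongestPossible str_1 str_2)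

-- ===== LEMMAS AND PROOFS =====

-- recursive description of B's adjacent-dedup fold
def ddAdj : Option Char → List Char → List Char
  | _, [] => []
  | prev, c :: rest => if prev = some c then ddAdj prev rest else c :: ddAdj (some c) rest

theorem foldl_ddAdj (l : List Char) (acc : List Char) (prev : Option Char) :
    (l.foldl (fun (st : List Char × Option Char) ch =>
      if st.2 = some ch then st else (st.1 ++ [ch], some ch)) (acc, prev)).1
    = acc ++ ddAdj prev l := by
  induction l generalizing acc prev with
  | nil => simp [ddAdj]
  | cons c rest ih =>
    simp only [List.foldl_cons, ddAdj]
    by_cases h : prev = some c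
    · simp [h, ih]
    · simp [h, ih, List.append_assoc]

theorem mem_ddAdj (l : List Char) (prev : Option Char)
    (hs : l.Pairwise (· ≤ ·))
    (hlow : ∀ p, prev = some p → ∀ x ∈ l, p ≤ x) :
    ∀ x, x ∈ ddAdj prev l ↔ x ∈ l ∧ prev ≠ some x := by
  induction l generalizing prev with
  | nil => simp [ddAdj]
  | cons c rest ih =>
    have hc : ∀ x ∈ rest, c ≤ x := (List.pairwise_cons.mp hs).1
    have hs' : rest.Pairwise (· ≤ ·) := (List.pairwise_cons.mp hs).2
    intro x
    by_cases h : prev = some c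
    · have hlow' : ∀ p, prev = some p → ∀ y ∈ rest, p ≤ y := by
        intro p hp y hy
        exact hlow p hp y (List.mem_cons_of_mem _ hy)
      simp only [ddAdj, if_pos h]
      rw [ih prev hs' hlow']
      subst h
      simp only [List.mem_cons]
      constructor
      · rintro ⟨hx, hne⟩
        exact ⟨Or.inr hx, hne⟩
      · rintro ⟨hx | hx, hne⟩
        · exact absurd (by rw [hx]) hne
        · exact ⟨hx, hne⟩
    · have hlow' : ∀ p, some c = some p → ∀ y ∈ rest, p ≤ y := by
        intro p hp y hy
        cases hp
        exact hc y hy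
      simp only [ddAdj, if_neg h, List.mem_cons, ih (some c) hs' hlow']
      constructor
      · rintro (hx | ⟨hx, hne⟩)
        · subst hx
          exact ⟨Or.inl rfl, h⟩
        · refine ⟨Or.inr hx, ?_⟩
          intro hpx
          obtain ⟨p, hp⟩ : ∃ p, prev = some p := ⟨x, hpx⟩
          rw [hp] at hpx
          injection hpx with hpx
          have h1 : p ≤ c := hlow p hp c (List.mem_cons_self)
          have h2 : c ≤ x := hc x hx
          have : p = c := le_antisymm h1 (hpx ▸ h2)
          exact h (hp.trans (by rw [this]))
      · rintro ⟨hx | hx, hne⟩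
        · exact Or.inl hx
        · by_cases hxc : some c = some x
          · injection hxc with hxc; exact Or.inl hxc.symm
          · exact Or.inr ⟨hx, hxc⟩

theorem pairwise_ddAdj (l : List Char) (prev : Option Char)
    (hs : l.Pairwise (· ≤ ·))
    (hlow : ∀ p, prev = some p → ∀ x ∈ l, p ≤ x) :
    (ddAdj prev l).Pairwise (· < ·) := by
  induction l generalizing prev with
  | nil => simp [ddAdj]
  | cons c rest ih =>
    have hc : ∀ x ∈ rest, c ≤ x := (List.pairwise_cons.mp hs).1
    have hs' : rest.Pairwise (· ≤ ·) := (List.pairwise_cons.mp hs).2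
    by_cases h : prev = some c
    · have hlow' : ∀ p, prev = some p → ∀ y ∈ rest, p ≤ y := by
        intro p hp y hy
        exact hlow p hp y (List.mem_cons_of_mem _ hy)
      simpa [ddAdj, if_pos h] using ih prev hs' hlow'
    · have hlow' : ∀ p, some c = some p → ∀ y ∈ rest, p ≤ y := by
        intro p hp y hy
        cases hp
        exact hc y hy
      simp only [ddAdj, if_neg h, List.pairwise_cons]
      refine ⟨?_, ih (some c) hs' hlow'⟩
      intro y hy
      have := (mem_ddAdj rest (some c) hs' hlow' y).mp hy
      have h1 : c ≤ y := hc y this.1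
      have h2 : some c ≠ some y := this.2
      exact lt_of_le_of_ne h1 (fun hh => h2 (by rw [hh]))

theorem csLongestPossible_eq (str_1 str_2 : String) :
    csLongestPossible str_1 str_2 = csLongestPossible_alt str_1 str_2 := by
  unfold csLongestPossible csLongestPossible_alt
  set l := str_1.toList ++ str_2.toList with hl
  -- A's two folds build PySem.Set.ofList l
  have hA : (str_2.toList.foldl (fun out c => if out.contains c then out else out ++ [c])
      (str_1.toList.foldl (fun out c => if out.contains c then out else out ++ [c]) []))
      = PySem.Set.ofList l := by
    rw [PySem.Set.ofList_eq_foldl, hl, List.foldl_append]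
    rfl
  -- B's fold = ddAdj none of the sorted list
  have hB : ((PySem.List.sorted l (fun x => x) false).foldl
      (fun (st : List Char × Option Char) ch =>
        if st.2 = some ch then st else (st.1 ++ [ch], some ch)) ([], none)).1
      = ddAdj none (PySem.List.sorted l (fun x => x) false) := by
    rw [foldl_ddAdj]; rfl
  simp only [hA, hB]
  congr 1
  have hsort : (PySem.List.sorted l (fun x => x) false).Pairwise (· ≤ ·) :=
    PySem.List.sorted_pairwise l (fun x => x)
  have hlow : ∀ p, (none : Option Char) = some p →
      ∀ x ∈ PySem.List.sorted l (fun x => x) false, p ≤ x := by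
    intro p hp; cases hp
  have hmem := mem_ddAdj (PySem.List.sorted l (fun x => x) false) none hsort hlow
  have hpw := pairwise_ddAdj (PySem.List.sorted l (fun x => x) false) none hsort hlow
  have hnd : (ddAdj none (PySem.List.sorted l (fun x => x) false)).Nodup :=
    hpw.imp ne_of_lt
  have hperm : (ddAdj none (PySem.List.sorted l (fun x => x) false)).Perm
      (PySem.Set.ofList l) := by
    rw [List.perm_ext_iff_of_nodup hnd (PySem.Set.nodup_ofList l)]
    intro a
    rw [hmem a, PySem.Set.mem_ofList, PySem.List.mem_sorted]
    simp
  exact (PySem.List.sorted_eq_of_perm_of_pairwise_lt _ _ (fun x => x) hperm hpw)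

-- ===== VERDICT (by name: the statement is the Claim_ definition above) =====
theorem csLongestPossible_spec : Claim_equal_csLongestPossible := by
  intro s1 s2 _
  unfold Spec_csLongestPossible
  exact csLongestPossible_eq s1 s2
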